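-- pv_equiv track=rewrite | github.com/punk1503/Alias_Decode | alias.py | ascii_convert
-- ===== SOURCE A (Python) =====
-- def ascii_convert(ndx):
--     key=list(range(32,127))
--     key=key+list(range(192,256))
--
--     value=[chr(i) for i in range(32, 127)]
--     value=value+list([chr(i) for i in range(1040, 1104)])
--
--     ascii_codes=dict(zip(key, value))
--     if int(ndx) in ascii_codes:
--         return ascii_codes[int(ndx)]
--     else:
--         return ''
-- ===== SOURCE B (Python) =====
-- def ascii_convert(ndx):
--     n = int(ndx)
--     if 32 <= n <= 126:
--         return chr(n)
--     if 192 <= n <= 255: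
--         return chr(n - 192 + 1040)
--     return ''
-- ===== Notes on version B (the rewrite author's own statement) =====
-- stated objective: simpler
-- what changed: Replaces building a code-to-char dict (two ranges zipped into a table) and looking the code up in it by direct range tests with closed-form chr() arithmetic, maintaining no data structure.
import Mathlib
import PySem

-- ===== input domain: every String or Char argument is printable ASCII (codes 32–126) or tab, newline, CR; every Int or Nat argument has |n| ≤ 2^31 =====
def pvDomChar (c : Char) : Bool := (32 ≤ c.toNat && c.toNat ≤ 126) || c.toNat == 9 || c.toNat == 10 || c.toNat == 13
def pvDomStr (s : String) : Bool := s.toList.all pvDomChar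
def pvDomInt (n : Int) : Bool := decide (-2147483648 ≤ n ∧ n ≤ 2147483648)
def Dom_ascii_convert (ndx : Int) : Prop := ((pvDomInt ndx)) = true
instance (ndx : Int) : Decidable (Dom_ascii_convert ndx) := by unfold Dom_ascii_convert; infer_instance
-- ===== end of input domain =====

-- ===== PORT A =====
def pvChr (i : Int) : String := String.ofList [Char.ofNat i.toNat]

-- A: builds key = range(32,127)+range(192,256), value = chars of range(32,127)+range(1040,1104),
-- zips them into a dict, and looks int(ndx) up (int(ndx) = ndx since ndx : Int).
def ascii_convert (ndx : Int) : String :=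
  let key := PySem.List.pyRange 32 127 1
  let key := key ++ PySem.List.pyRange 192 256 1
  let value := (PySem.List.pyRange 32 127 1).map pvChr
  let value := value ++ (PySem.List.pyRange 1040 1104 1).map pvChr
  let ascii_codes := PySem.Dict.ofList (key.zip value)
  match ascii_codes.get? ndx with
  | some v => v
  | none => ""

-- ===== PORT B =====
-- B: no table; direct range tests with chr() arithmetic.
def ascii_convert_alt (ndx : Int) : String :=
  if 32 ≤ ndx ∧ ndx ≤ 126 then pvChr ndx
  else if 192 ≤ ndx ∧ ndx ≤ 255 then pvChr (ndx - 192 + 1040)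
  else ""

-- ===== PRECONDITION & SPEC =====
def Spec_ascii_convert (ndx : Int) (out : String) : Prop := out = ascii_convert_alt ndx
instance (ndx : Int) (out : String) : Decidable (Spec_ascii_convert ndx out) := by unfold Spec_ascii_convert; infer_instance

-- ===== CLAIM (what is proved, stated in full; the proofs are below) =====
def Claim_equal_ascii_convert : Prop := ∀ (ndx : Int), Dom_ascii_convert ndx → Spec_ascii_convert ndx (ascii_convert ndx)

-- ===== LEMMAS AND PROOFS =====

-- The concrete dict A builds, characterised as a map over its key list.
set_option maxRecDepth 100000 in
theorem pvItems :
    (PySem.Dict.ofList ((PySem.List.pyRange 32 127 1 ++ PySem.List.pyRange 192 256 1).zip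
      ((PySem.List.pyRange 32 127 1).map pvChr ++ (PySem.List.pyRange 1040 1104 1).map pvChr))).items
    = (PySem.List.pyRange 32 127 1 ++ PySem.List.pyRange 192 256 1).map
        (fun i => (i, if i ≤ (126 : Int) then pvChr i else pvChr (i + 848))) := by
  decide

theorem ascii_convert_spec : Claim_equal_ascii_convert := by
  intro ndx _
  unfold Spec_ascii_convert ascii_convert ascii_convert_alt
  simp only []
  set d := PySem.Dict.ofList ((PySem.List.pyRange 32 127 1 ++ PySem.List.pyRange 192 256 1).zip
      ((PySem.List.pyRange 32 127 1).map pvChr ++ (PySem.List.pyRange 1040 1104 1).map pvChr)) with hd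
  have hnd : d.keys.Nodup := PySem.Dict.nodup_keys_ofList _
  by_cases h1 : 32 ≤ ndx ∧ ndx ≤ 126
  · have hmem : (ndx, pvChr ndx) ∈ d.items := by
      rw [hd, pvItems]
      refine List.mem_map.mpr ⟨ndx, ?_, by simp [h1.2]⟩
      exact List.mem_append_left _ (PySem.List.mem_pyRange_one.mpr (by omega))
    rw [PySem.Dict.get?_of_mem_items _ hmem hnd]
    simp [h1]
  · by_cases h2 : 192 ≤ ndx ∧ ndx ≤ 255
    · have hmem : (ndx, pvChr (ndx + 848)) ∈ d.items := by
        rw [hd, pvItems]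
        refine List.mem_map.mpr ⟨ndx, ?_, by simp; omega⟩
        exact List.mem_append_right _ (PySem.List.mem_pyRange_one.mpr (by omega))
      rw [PySem.Dict.get?_of_mem_items _ hmem hnd]
      have : ndx - 192 + 1040 = ndx + 848 := by ring
      simp [h1, h2, this]
    · have hnm : d.get? ndx = none := by
        rw [PySem.Dict.get?_eq_none_iff_not_mem_keys]
        rw [hd]
        unfold PySem.Dict.keys
        rw [pvItems]
        simp only [List.map_map, List.mem_map, Function.comp_def, List.mem_append, PySem.List.mem_pyRange_one]
        rintro ⟨i, hi, rfl⟩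
        omega
      rw [hnm]
      simp [h1, h2]
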